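-- pv_equiv track=rewrite | github.com/louissiu198/CIS-Hackathon | libraries/recognition.py | fetch_electronics
-- ===== SOURCE A (Python) =====
-- def fetch_electronics(lists: list) -> str | bool: # do microwave
--     item_name, temp_item = "", ""
--     for sub_list in lists:
--         temp_item = sub_list["item_name"].lower()
--         if "mobile" in temp_item or "phone" in temp_item or "apple" in temp_item or "mobile phone" in temp_item:
--             item_name = "mobile"
--         elif "laptop" in temp_item or "pc" in temp_item or "computer" in temp_item or "macbook" in temp_item:
--             item_name = "computer"
--         elif "television" in temp_item or "display device" in temp_item:
--             item_name = "television"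
--         elif "surveillance camera" in temp_item or "cctv" in temp_item or "cameras & optics" in temp_item or "dashcam" in temp_item:
--             item_name = "security_camera"
--         elif "projector" in temp_item:
--             item_name = "projector"
--         elif "Home appliance" in temp_item: # air condition
--             item_name = "appliance"
--         elif "microwave" in temp_item or "oven" in temp_item:
--             item_name = "microwave"
--     is_electronic = item_name != ""
--     if is_electronic != True:
--         item_name = temp_item
--     return item_name, is_electronic
-- ===== SOURCE B (Python) =====
-- # Reverse scan with early exit over an ordered keyword table, instead of a
-- # forward scan that keeps overwriting the last classification.
-- _CATEGORIES = (
--     ("mobile", ("mobile", "phone", "apple")),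
--     ("computer", ("laptop", "pc", "computer", "macbook")),
--     ("television", ("television", "display device")),
--     ("security_camera", ("surveillance camera", "cctv", "cameras & optics", "dashcam")),
--     ("projector", ("projector",)),
--     ("appliance", ("Home appliance",)),  # capital H as in the original table: never matches a lowered name
--     ("microwave", ("microwave", "oven")),
-- )
--
-- def _classify(name):
--     for cat, kws in _CATEGORIES:
--         if any(k in name for k in kws):
--             return cat
--     return ""
--
-- def fetch_electronics(lists: list):
--     temp_item = lists[-1]["item_name"].lower() if lists else ""
--     for sub_list in reversed(lists):
--         cat = _classify(sub_list["item_name"].lower())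
--         if cat:
--             return cat, True
--     return temp_item, False
-- ===== Notes on version B (the rewrite author's own statement) =====
-- stated objective: alternative
-- what changed: Replaces the forward scan-all loop that keeps overwriting the last classification with a data-driven ordered keyword table and a reverse scan that returns at the first element that classifies.
import Mathlib
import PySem

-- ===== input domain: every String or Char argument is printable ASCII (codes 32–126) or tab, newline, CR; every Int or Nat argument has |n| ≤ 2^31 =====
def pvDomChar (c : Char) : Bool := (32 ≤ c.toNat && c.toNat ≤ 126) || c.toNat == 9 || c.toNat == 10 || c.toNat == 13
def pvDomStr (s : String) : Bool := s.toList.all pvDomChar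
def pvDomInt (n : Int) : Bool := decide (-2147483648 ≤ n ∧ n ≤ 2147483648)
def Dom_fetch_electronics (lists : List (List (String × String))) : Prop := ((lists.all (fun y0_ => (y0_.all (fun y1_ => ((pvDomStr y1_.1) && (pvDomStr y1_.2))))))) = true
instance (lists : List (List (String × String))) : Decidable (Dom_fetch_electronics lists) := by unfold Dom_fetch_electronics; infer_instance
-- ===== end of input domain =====

-- B replaces A's forward scan-all loop (overwriting the last classification) with an
-- ordered keyword table and a reverse scan that stops at the first element that classifies.


-- ===== PORT A =====
-- sub_list["item_name"]: dict lookup (first match); KeyError (none) excluded by Pre_, default "" never used inside Pre_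
-- loop body of A's for-loop, as a helper (state = (item_name, temp_item))
def pvStepA (acc : String × String) (sub_list : List (String × String)) : String × String :=
    let temp_item := PySem.Str.lower (((PySem.Dict.mk sub_list).get? "item_name").getD "")
    let item_name :=
      if PySem.Str.isIn "mobile" temp_item || PySem.Str.isIn "phone" temp_item ||
         PySem.Str.isIn "apple" temp_item || PySem.Str.isIn "mobile phone" temp_item then "mobile"
      else if PySem.Str.isIn "laptop" temp_item || PySem.Str.isIn "pc" temp_item ||
              PySem.Str.isIn "computer" temp_item || PySem.Str.isIn "macbook" temp_item then "computer"
      else if PySem.Str.isIn "television" temp_item || PySem.Str.isIn "display device" temp_item then "television"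
      else if PySem.Str.isIn "surveillance camera" temp_item || PySem.Str.isIn "cctv" temp_item ||
              PySem.Str.isIn "cameras & optics" temp_item || PySem.Str.isIn "dashcam" temp_item then "security_camera"
      else if PySem.Str.isIn "projector" temp_item then "projector"
      else if PySem.Str.isIn "Home appliance" temp_item then "appliance"
      else if PySem.Str.isIn "microwave" temp_item || PySem.Str.isIn "oven" temp_item then "microwave"
      else acc.1
    (item_name, temp_item)

def fetch_electronics (lists : List (List (String × String))) : String × Bool :=
  let st := lists.foldl pvStepA ("", "")
  let is_electronic : Bool := st.1 != ""
  (if is_electronic != true then st.2 else st.1, is_electronic)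

-- ===== PORT B =====
def pvCategories : List (String × List String) :=
  [("mobile", ["mobile", "phone", "apple"]),
   ("computer", ["laptop", "pc", "computer", "macbook"]),
   ("television", ["television", "display device"]),
   ("security_camera", ["surveillance camera", "cctv", "cameras & optics", "dashcam"]),
   ("projector", ["projector"]),
   ("appliance", ["Home appliance"]),
   ("microwave", ["microwave", "oven"])]

-- sub_list["item_name"].lower()
def pvName (sub_list : List (String × String)) : String :=
  PySem.Str.lower (((PySem.Dict.mk sub_list).get? "item_name").getD "")

-- _classify: first category (in table order) one of whose keywords occurs in name, else ""
def pvClassify (name : String) : String :=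
  match pvCategories.find? (fun c => c.2.any (fun k => PySem.Str.isIn k name)) with
  | some c => c.1
  | none => ""

-- the reversed for-loop with early return
def pvScan : List (List (String × String)) → Option String
  | [] => none
  | sub_list :: rest =>
    let cat := pvClassify (pvName sub_list)
    if cat != "" then some cat else pvScan rest

def fetch_electronics_alt (lists : List (List (String × String))) : String × Bool :=
  let temp_item :=
    match lists.getLast? with
    | some sub_list => pvName sub_list
    | none => ""
  match pvScan lists.reverse with
  | some cat => (cat, true)
  | none => (temp_item, false)

-- ===== PRECONDITION & SPEC =====
-- Pre_ excludes exactly the inputs where Python A raises KeyError: a sub_list without the "item_name" key.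
def Pre_fetch_electronics (lists : List (List (String × String))) : Prop :=
  ∀ sub_list ∈ lists, "item_name" ∈ sub_list.map Prod.fst
instance (lists : List (List (String × String))) : Decidable (Pre_fetch_electronics lists) := by unfold Pre_fetch_electronics; infer_instance

def pvWitness_fetch_electronics : (List (List (String × String))) :=
  [[("item_name", "Apple iPhone")], [("item_name", "chair")]]

def Spec_fetch_electronics (lists : List (List (String × String))) (out : String × Bool) : Prop := out = fetch_electronics_alt lists
instance (lists : List (List (String × String))) (out : String × Bool) : Decidable (Spec_fetch_electronics lists out) := by unfold Spec_fetch_electronics; infer_instance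

-- ===== CLAIM (what is proved, stated in full; the proofs are below) =====
def Claim_equal_fetch_electronics : Prop := ∀ (lists : List (List (String × String))), Dom_fetch_electronics lists → Pre_fetch_electronics lists → Spec_fetch_electronics lists (fetch_electronics lists)

-- ===== LEMMAS AND PROOFS =====

-- "mobile phone" in t implies "phone" in t (the redundant disjunct A carries)
lemma pvIsIn_mobile_phone {t : String} (h : PySem.Str.isIn "mobile phone" t = true) :
    PySem.Str.isIn "phone" t = true := by
  rw [PySem.Str.isIn_iff_infix] at h ⊢
  exact List.IsInfix.trans (by decide) h

-- A's elif chain is B's table classification with fallback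
lemma pvChain_eq (t i : String) :
    (if PySem.Str.isIn "mobile" t || PySem.Str.isIn "phone" t ||
        PySem.Str.isIn "apple" t || PySem.Str.isIn "mobile phone" t then "mobile"
     else if PySem.Str.isIn "laptop" t || PySem.Str.isIn "pc" t ||
             PySem.Str.isIn "computer" t || PySem.Str.isIn "macbook" t then "computer"
     else if PySem.Str.isIn "television" t || PySem.Str.isIn "display device" t then "television"
     else if PySem.Str.isIn "surveillance camera" t || PySem.Str.isIn "cctv" t ||
             PySem.Str.isIn "cameras & optics" t || PySem.Str.isIn "dashcam" t then "security_camera"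
     else if PySem.Str.isIn "projector" t then "projector"
     else if PySem.Str.isIn "Home appliance" t then "appliance"
     else if PySem.Str.isIn "microwave" t || PySem.Str.isIn "oven" t then "microwave"
     else i)
    = (if pvClassify t != "" then pvClassify t else i) := by
  simp only [pvClassify, pvCategories, List.find?, List.any_cons, List.any_nil, Bool.or_false]
  cases h0 : PySem.Str.isIn "mobile phone" t with
  | true =>
    rw [pvIsIn_mobile_phone h0]
    simp
  | false =>
    simp only [Bool.or_false, Bool.or_assoc]
    cases h1 : (PySem.Str.isIn "mobile" t || (PySem.Str.isIn "phone" t || PySem.Str.isIn "apple" t)) with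
    | true => simp
    | false =>
      cases h2 : (PySem.Str.isIn "laptop" t || (PySem.Str.isIn "pc" t || (PySem.Str.isIn "computer" t || PySem.Str.isIn "macbook" t))) with
      | true => simp
      | false =>
        cases h3 : (PySem.Str.isIn "television" t || PySem.Str.isIn "display device" t) with
        | true => simp
        | false =>
          cases h4 : (PySem.Str.isIn "surveillance camera" t || (PySem.Str.isIn "cctv" t || (PySem.Str.isIn "cameras & optics" t || PySem.Str.isIn "dashcam" t))) with
          | true => simp
          | false =>
            cases h5 : (PySem.Str.isIn "projector" t) with
            | true => simp
            | false =>
              cases h6 : (PySem.Str.isIn "Home appliance" t) with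
              | true => simp
              | false =>
                cases h7 : (PySem.Str.isIn "microwave" t || PySem.Str.isIn "oven" t) with
                | true => simp
                | false =>
                  simp

-- A's loop step in terms of B's classifier
lemma pvStepA_eq (acc : String × String) (sub_list : List (String × String)) :
    pvStepA acc sub_list =
      ((if pvClassify (pvName sub_list) != "" then pvClassify (pvName sub_list) else acc.1),
       pvName sub_list) := by
  show (if _ then _ else _, _) = _
  rw [pvChain_eq]
  rfl

-- pvScan only returns non-empty categories
lemma pvScan_some {xs : List (List (String × String))} {c : String}
    (h : pvScan xs = some c) : (c != "") = true := by
  induction xs with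
  | nil => simp [pvScan] at h
  | cons x rest ih =>
    simp only [pvScan] at h
    split at h
    · cases h; assumption
    · exact ih h

-- A's fold, characterised by B's reverse scan and the last element's name
lemma pvFold_eq (xs : List (List (String × String))) (i t : String) :
    xs.foldl pvStepA (i, t) =
      ((match pvScan xs.reverse with | some c => c | none => i),
       (match xs.getLast? with | some sub => pvName sub | none => t)) := by
  induction xs using List.reverseRecOn generalizing i t with
  | nil => simp [pvScan]
  | append_singleton ys x ih =>
    rw [List.foldl_append, ih, List.foldl_cons, List.foldl_nil, pvStepA_eq]
    simp only [List.reverse_append, List.reverse_singleton, List.singleton_append,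
      List.getLast?_concat, pvScan]
    cases h : (pvClassify (pvName x) != "") <;> simp

-- ===== VERDICT (by name: the statement is the Claim_ definition above) =====
theorem fetch_electronics_spec : Claim_equal_fetch_electronics := by
  intro lists _ _
  unfold Spec_fetch_electronics fetch_electronics fetch_electronics_alt
  rw [pvFold_eq]
  cases h : pvScan lists.reverse with
  | some c => simp [pvScan_some h]
  | none => simp
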